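-- pv_equiv track=rewrite | github.com/jhyang12345/algorithm-problems | kickstart/kickstart_2020_a_bundling.py | get_max_sum_of_scores
-- ===== SOURCE A (Python) =====
-- class Trie:
--     def __init__(self, char):
--         self.char = char
--         self.length = 0
--         self.count = 1
--         self.children = {}
--
--     def add(self, char):
--         node = None
--         if char in self.children:
--             node = self.children[char]
--             node.count += 1
--         else:
--             node = Trie(char)
--             self.children[char] = node
--         node.length = self.length + 1
--         return node
--
--     def __str__(self):
--         return f"{self.count} {self.children.keys()}"
--
-- def dfs(root, k):
--     s = 0
--     value = 0
--     for key in root.children: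
--         node, count, v = dfs(root.children[key], k)
--         s += count
--         value += v
--     count = 0
--     root.count -= s
--
--     if root.count >= k:
--         remainder = root.count % k
--         count = root.count - remainder
--         value += root.length
--     return root, count + s, value
--
-- def get_max_sum_of_scores(words, k):
--     root = Trie(None)
--     for word in words:
--         next = root
--         for ch in word:
--             next = next.add(ch)
--     _, _, value = dfs(root, k)
--     return value
-- ===== SOURCE B (Python) =====
-- # B: no trie -- recursive partition of the word list into suffix groups by leading
-- # character; each call returns (consumed, value) for the group at depth d.
-- def _loop(longer, d, k):
--     # longer: nonempty suffixes; consume groups sharing a first character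
--     consumed = 0
--     value = 0
--     while longer:
--         c = longer[0][0]
--         cc, vv = _solve([w[1:] for w in longer if w[0] == c], d + 1, k)
--         consumed += cc
--         value += vv
--         longer = [w for w in longer if w[0] != c]
--     return consumed, value
--
-- def _solve(group, d, k):
--     consumed, value = _loop([w for w in group if w], d, k)
--     remaining = len(group) - consumed
--     if remaining >= k:
--         value += d
--         consumed += remaining - remaining % k
--     return consumed, value
--
-- def get_max_sum_of_scores(words, k):
--     return _solve(list(words), 0, k)[1]
-- ===== Notes on version B (the rewrite author's own statement) =====
-- stated objective: alternative
-- what changed: B drops A's mutable Trie class entirely: it recursively partitions the word list into suffix groups by leading character, computing (consumed, value) per group directly, with no node objects, no dict mutation and no separate build-then-dfs phases.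
-- outside the precondition, e.g. on get_max_sum_of_scores(['a'], 0): A raises ZeroDivisionError, B raises ZeroDivisionError
import Mathlib
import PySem

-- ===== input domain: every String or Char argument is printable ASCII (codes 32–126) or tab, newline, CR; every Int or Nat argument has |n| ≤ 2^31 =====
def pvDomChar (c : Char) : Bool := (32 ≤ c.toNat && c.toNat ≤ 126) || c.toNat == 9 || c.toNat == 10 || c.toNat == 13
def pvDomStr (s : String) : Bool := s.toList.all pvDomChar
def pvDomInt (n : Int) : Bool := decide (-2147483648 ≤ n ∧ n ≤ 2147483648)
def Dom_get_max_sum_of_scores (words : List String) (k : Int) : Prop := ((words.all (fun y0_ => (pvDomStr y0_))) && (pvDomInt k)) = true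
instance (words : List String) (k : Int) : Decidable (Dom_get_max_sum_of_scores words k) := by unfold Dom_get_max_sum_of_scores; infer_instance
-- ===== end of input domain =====

-- B replaces A's mutable Trie by a direct recursion that partitions the word list
-- into suffix groups by leading character (objective: alternative decomposition).

-- ===== PORT A =====
-- Trie node: (char, length, count, children); children is an insertion-ordered
-- association list (a mutual inductive, since a nested 'List Trie' is not allowed).
mutual
inductive Trie where
  | mk : Option Char → Int → Int → TChildren → Trie
inductive TChildren where
  | nil : TChildren
  | cons : Char → Trie → TChildren → TChildren
end

-- dict lookup (first match) and dict assignment (overwrite in place, else append)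
def findC : TChildren → Char → Option Trie
  | .nil, _ => none
  | .cons c t rest, ch => if c = ch then some t else findC rest ch

def setC : TChildren → Char → Trie → TChildren
  | .nil, ch, v => .cons ch v .nil
  | .cons c t rest, ch, v => if c = ch then .cons c v rest else .cons c t (setC rest ch v)

-- the inner 'for ch in word: next = next.add(ch)' loop: each step bumps/creates the
-- child (count += 1, length = parent.length + 1), stores it, and continues inside it
def addWord : Trie → List Char → Trie
  | t, [] => t
  | .mk ch len cnt children, c :: cs =>
    let child := match findC children c with
      | some (.mk cc _ ccnt cch) => Trie.mk cc (len + 1) (ccnt + 1) cch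
      | none => Trie.mk (some c) (len + 1) 1 .nil
    Trie.mk ch len cnt (setC children c (addWord child cs))

-- dfs returns (count + s, value); the mutated node itself is dropped (unused upstream)
mutual
def dfsT : Trie → Int → Int × Int
  | .mk _ len cnt children, k =>
    let (s, value) := dfsC children k
    let cnt' := cnt - s
    if cnt' ≥ k then ((cnt' - PySem.Int.mod cnt' k) + s, value + len)
    else (0 + s, value)
def dfsC : TChildren → Int → Int × Int
  | .nil, _ => (0, 0)
  | .cons _ t rest, k =>
    let (c1, v1) := dfsT t k
    let (s2, v2) := dfsC rest k
    (c1 + s2, v1 + v2)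
end

def get_max_sum_of_scores (words : List String) (k : Int) : Int :=
  let root := words.foldl (fun r w => addWord r w.toList) (Trie.mk none 0 1 .nil)
  (dfsT root k).2

-- ===== PORT B =====
-- termination measure for the group recursion (cited by decreasing_by below)
def muW (g : List (List Char)) : Nat := (g.map (fun w => w.length + 1)).sum

theorem muW_filter_le (g : List (List Char)) (p : List Char → Bool) : muW (g.filter p) ≤ muW g := by
  unfold muW
  exact List.Sublist.sum_le_sum ((List.filter_sublist (p := p) (l := g)).map _) (by simp)

theorem muW_map_tail (l : List (List Char)) (h : ∀ x ∈ l, x ≠ []) :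
    muW (l.map (fun x => x.tail)) + l.length = muW l := by
  induction l with
  | nil => simp [muW]
  | cons y ys ih =>
    have hy : 0 < y.length := List.length_pos_of_ne_nil (h y (by simp))
    have := ih (fun x hx => h x (by simp [hx]))
    simp only [muW, List.map_cons, List.sum_cons, List.length_cons, List.length_tail] at *
    omega

theorem muW_sub_lt (w : List Char) (rest : List (List Char)) (c : Char) (hw : w.head? = some c) :
    muW (((( w :: rest).filter (fun x => x.head? == some c)).map (fun x => x.tail))) < muW (w :: rest) := by
  have h1 : muW ((w :: rest).filter (fun x => x.head? == some c)) ≤ muW (w :: rest) := muW_filter_le _ _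
  have h2 : muW ((((w :: rest).filter (fun x => x.head? == some c)).map (fun x => x.tail)))
      + ((w :: rest).filter (fun x => x.head? == some c)).length
      = muW ((w :: rest).filter (fun x => x.head? == some c)) := by
    refine muW_map_tail _ (fun x hx => ?_)
    rcases List.mem_filter.1 hx with ⟨-, hx2⟩
    intro hxe; subst hxe; simp at hx2
  have h3 : 0 < ((w :: rest).filter (fun x => x.head? == some c)).length := by
    have : w ∈ (w :: rest).filter (fun x => x.head? == some c) := by
      simp [List.mem_filter, hw]
    exact List.length_pos_of_mem this
  omega

theorem muW_rest_lt (w : List Char) (rest : List (List Char)) (c : Char) (hw : w.head? = some c) :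
    muW ((w :: rest).filter (fun x => x.head? != some c)) < muW (w :: rest) := by
  have : (w :: rest).filter (fun x => x.head? != some c) = rest.filter (fun x => x.head? != some c) := by
    simp [hw]
  rw [this]
  have h1 : muW (rest.filter (fun x => x.head? != some c)) ≤ muW rest := muW_filter_le _ _
  simp only [muW, List.map_cons, List.sum_cons] at *
  omega

mutual
-- B's while loop: peel off the group of suffixes sharing the first character
def solveLoop (longer : List (List Char)) (d k consumed value : Int) : Int × Int :=
  match longer with
  | [] => (consumed, value)
  | w :: rest =>
    match hw : w.head? with
    | none => (consumed, value)   -- unreachable guard: callers pass nonempty suffixes only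
    | some c =>
      let sub := ((w :: rest).filter (fun x => x.head? == some c)).map (fun x => x.tail)
      let cv := solveB sub (d + 1) k
      solveLoop ((w :: rest).filter (fun x => x.head? != some c)) d k (consumed + cv.1) (value + cv.2)
termination_by (muW longer, 0, longer.length)
decreasing_by
  · exact Prod.Lex.left _ _ (muW_sub_lt w rest c hw)
  · have h1 : muW ((w :: rest).filter (fun x => x.head? != some c)) < muW (w :: rest) :=
      muW_rest_lt w rest c hw
    exact Prod.Lex.left _ _ h1
-- B's solve: recurse over the nonempty suffixes, then bundle what the children left over
def solveB (group : List (List Char)) (d k : Int) : Int × Int :=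
  let cv := solveLoop (group.filter (fun w => !w.isEmpty)) d k 0 0
  let remaining := (group.length : Int) - cv.1
  if remaining ≥ k then (cv.1 + (remaining - PySem.Int.mod remaining k), cv.2 + d)
  else (cv.1, cv.2)
termination_by (muW group, 1, 0)
decreasing_by
  rcases Nat.lt_or_eq_of_le (muW_filter_le group (fun w => !w.isEmpty)) with h | h
  · exact Prod.Lex.left _ _ h
  · rw [h]; exact Prod.Lex.right _ (Prod.Lex.left _ _ Nat.zero_lt_one)
end

def get_max_sum_of_scores_alt (words : List String) (k : Int) : Int :=
  (solveB (words.map (fun w => w.toList)) 0 k).2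

-- ===== PRECONDITION & SPEC =====
-- Pre_ excludes exactly k = 0, where Python A raises ZeroDivisionError ('% k').
def Pre_get_max_sum_of_scores (words : List String) (k : Int) : Prop := k ≠ 0
instance (words : List String) (k : Int) : Decidable (Pre_get_max_sum_of_scores words k) := by unfold Pre_get_max_sum_of_scores; infer_instance
def pvWitness_get_max_sum_of_scores : List String × Int := (["ab", "ac", "b"], 2)

def Spec_get_max_sum_of_scores (words : List String) (k : Int) (out : Int) : Prop := out = get_max_sum_of_scores_alt words k
instance (words : List String) (k : Int) (out : Int) : Decidable (Spec_get_max_sum_of_scores words k out) := by unfold Spec_get_max_sum_of_scores; infer_instance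

-- ===== CLAIM (what is proved, stated in full; the proofs are below) =====
def Claim_equal_get_max_sum_of_scores : Prop := ∀ (words : List String) (k : Int), Dom_get_max_sum_of_scores words k → Pre_get_max_sum_of_scores words k → Spec_get_max_sum_of_scores words k (get_max_sum_of_scores words k)

-- ===== LEMMAS AND PROOFS =====

-- Characterization of the trie A builds: the children of the node for a group of
-- (nonempty) suffixes `longer`, listed in first-occurrence order of leading chars.
def buildC (longer : List (List Char)) (d : Int) : TChildren :=
  match longer with
  | [] => .nil
  | w :: rest =>
    match hw : w.head? with
    | none => .nil
    | some c =>
      let P := (w :: rest).filter (fun x => x.head? == some c)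
      .cons c (Trie.mk (some c) (d + 1) (P.length : Int)
          (buildC ((P.map (fun x => x.tail)).filter (fun x => !x.isEmpty)) (d + 1)))
        (buildC ((w :: rest).filter (fun x => x.head? != some c)) d)
termination_by muW longer
decreasing_by
  · exact Nat.lt_of_le_of_lt (muW_filter_le _ _) (muW_sub_lt w rest c hw)
  · exact muW_rest_lt w rest c hw

def buildN (g : List (List Char)) (d : Int) : TChildren := buildC (g.filter (fun w => !w.isEmpty)) d

theorem buildN_append_nil (h : List (List Char)) (d : Int) : buildN (h ++ [[]]) d = buildN h d := by
  simp [buildN, List.filter_append]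

theorem filter_nonempty_ne_nil (g : List (List Char)) :
    ∀ x ∈ g.filter (fun w => !w.isEmpty), x ≠ [] := by
  intro x hx
  rcases List.mem_filter.1 hx with ⟨-, h2⟩
  simpa [List.isEmpty_iff] using h2

theorem filter_head_append (l : List (List Char)) (c : Char) (cs : List Char) :
    (l ++ [c :: cs]).filter (fun x => x.head? == some c) = l.filter (fun x => x.head? == some c) ++ [c :: cs] := by
  simp [List.filter_append]

theorem filter_head_append_ne (l : List (List Char)) (c c' : Char) (cs : List Char) (h : ¬ c' = c) :
    (l ++ [c :: cs]).filter (fun x => x.head? == some c') = l.filter (fun x => x.head? == some c') := by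
  simp [List.filter_append, Ne.symm h]

theorem filter_headne_append (l : List (List Char)) (c c' : Char) (cs : List Char) (h : ¬ c' = c) :
    (l ++ [c :: cs]).filter (fun x => x.head? != some c') = l.filter (fun x => x.head? != some c') ++ [c :: cs] := by
  simp [List.filter_append, Ne.symm h]

theorem filter_headne_append_self (l : List (List Char)) (c : Char) (cs : List Char) :
    (l ++ [c :: cs]).filter (fun x => x.head? != some c) = l.filter (fun x => x.head? != some c) := by
  simp [List.filter_append]

-- (K) inserting one more word into a built node appends it to the node's group
theorem addWord_buildN : ∀ (n : Nat) (w : List Char) (h : List (List Char)), w.length + h.length ≤ n →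
    ∀ (ch : Option Char) (d cnt : Int),
    addWord (Trie.mk ch d cnt (buildN h d)) w = Trie.mk ch d cnt (buildN (h ++ [w]) d) := by
  intro n
  induction n with
  | zero =>
    intro w h hlen ch d cnt
    have hw : w = [] := by
      cases w with
      | nil => rfl
      | cons c cs => simp at hlen
    subst hw
    simp [addWord, buildN_append_nil]
  | succ n ih =>
    intro w h hlen ch d cnt
    match w with
    | [] => simp [addWord, buildN_append_nil]
    | c :: cs =>
      have hfa : (h ++ [c :: cs]).filter (fun w => !w.isEmpty) = h.filter (fun w => !w.isEmpty) ++ [c :: cs] := by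
        simp [List.filter_append]
      simp only [buildN]
      rw [hfa]
      have hlen' : cs.length + (h.filter (fun w => !w.isEmpty)).length ≤ n := by
        have h1 := List.length_filter_le (fun w => !w.isEmpty) h
        simp only [List.length_cons] at hlen
        omega
      -- base computation for the empty group (creates the child; uses the outer IH on cs)
      have base : ∀ (ch : Option Char) (d cnt : Int), addWord (Trie.mk ch d cnt (buildC [] d)) (c :: cs) = Trie.mk ch d cnt (buildC [c :: cs] d) := by
        intro ch d cnt
        rw [addWord]
        have hnil : buildC [] d = TChildren.nil := by rw [buildC]
        rw [hnil]
        simp only [findC, setC]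
        have hchild : addWord (Trie.mk (some c) (d + 1) 1 TChildren.nil) cs
            = Trie.mk (some c) (d + 1) 1 (buildN [cs] (d + 1)) := by
          have h0 : TChildren.nil = buildN [] (d + 1) := by rw [buildN, List.filter_nil, buildC]
          rw [h0, ih cs [] (by simp only [List.length_cons] at hlen; simp; omega) (some c) (d + 1) 1]
          simp
        rw [hchild, buildC]
        simp only [List.head?_cons]
        simp [buildN]
        exact hnil.symm
      -- inner induction over the group of the node the new word descends into
      suffices inner : ∀ (m : Nat) (l : List (List Char)), l.length ≤ m → (∀ x ∈ l, x ≠ []) → cs.length + l.length ≤ n →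
          ∀ (ch : Option Char) (d cnt : Int),
          addWord (Trie.mk ch d cnt (buildC l d)) (c :: cs) = Trie.mk ch d cnt (buildC (l ++ [c :: cs]) d) by
        exact inner (h.filter (fun w => !w.isEmpty)).length _ le_rfl (filter_nonempty_ne_nil h) hlen' ch d cnt
      intro m
      induction m with
      | zero =>
        intro l hlm hne hlen2 ch d cnt
        have hl : l = [] := List.eq_nil_of_length_eq_zero (Nat.le_zero.1 hlm)
        subst hl
        simpa using base ch d cnt
      | succ m ihm =>
        intro l hlm hne hlen2 ch d cnt
        match l with
        | [] => simpa using base ch d cnt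
        | w' :: rest' =>
          obtain ⟨c', tl', rfl⟩ : ∃ a t, w' = a :: t := by
            cases w' with
            | nil => exact absurd rfl (hne [] (by simp))
            | cons a t => exact ⟨a, t, rfl⟩
          rw [buildC]
          simp only [List.head?_cons]
          rw [addWord]
          by_cases hc : c' = c
          · subst hc
            simp only [findC, setC, if_true]
            -- the new word descends into the existing child: outer IH on cs
            have hbump : addWord (Trie.mk (some c') (d + 1)
                ((((c' :: tl') :: rest').filter (fun x => x.head? == some c')).length + 1)
                (buildC (((((c' :: tl') :: rest').filter (fun x => x.head? == some c')).map (fun x => x.tail)).filter (fun x => !x.isEmpty)) (d + 1))) cs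
                = Trie.mk (some c') (d + 1)
                ((((c' :: tl') :: rest').filter (fun x => x.head? == some c')).length + 1)
                (buildN ((((c' :: tl') :: rest').filter (fun x => x.head? == some c')).map (fun x => x.tail) ++ [cs]) (d + 1)) := by
              have h0 : buildC (((((c' :: tl') :: rest').filter (fun x => x.head? == some c')).map (fun x => x.tail)).filter (fun x => !x.isEmpty)) (d + 1)
                  = buildN ((((c' :: tl') :: rest').filter (fun x => x.head? == some c')).map (fun x => x.tail)) (d + 1) := rfl
              rw [h0, ih cs _ (by
                have h1 := List.length_filter_le (fun x => x.head? == some c') ((c' :: tl') :: rest')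
                simp only [List.length_cons] at hlen2 h1 ⊢
                simp only [List.length_map]
                omega) (some c') (d + 1) _]
            rw [hbump]
            -- and the rebuilt trie on the extended group has exactly that child
            rw [show ((c' :: tl') :: rest') ++ [c' :: cs] = (c' :: tl') :: (rest' ++ [c' :: cs]) from rfl] at *
            rw [buildC]
            simp only [List.head?_cons]
            rw [show (c' :: tl') :: (rest' ++ [c' :: cs]) = ((c' :: tl') :: rest') ++ [c' :: cs] from rfl,
              filter_head_append, filter_headne_append_self]
            simp [buildN]
          · -- different first character: the child is untouched, recurse on the rest
            simp only [findC, setC, if_neg hc]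
            have hR : (((c' :: tl') :: rest').filter (fun x => x.head? != some c')).length ≤ m := by
              have h1 : (((c' :: tl') :: rest').filter (fun x => x.head? != some c')) = rest'.filter (fun x => x.head? != some c') := by simp
              rw [h1]
              have h2 := List.length_filter_le (fun x => x.head? != some c') rest'
              simp only [List.length_cons] at hlm
              omega
            have key := ihm (((c' :: tl') :: rest').filter (fun x => x.head? != some c')) hR
              (by intro x hx; exact hne x (List.mem_filter.1 hx).1)
              (by
                have h1 : (((c' :: tl') :: rest').filter (fun x => x.head? != some c')) = rest'.filter (fun x => x.head? != some c') := by simp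
                rw [h1]
                have h2 := List.length_filter_le (fun x => x.head? != some c') rest'
                simp only [List.length_cons] at hlen2
                omega) ch d cnt
            rw [addWord] at key
            simp only [Trie.mk.injEq, true_and] at key
            rw [key]
            rw [show ((c' :: tl') :: rest') ++ [c :: cs] = (c' :: tl') :: (rest' ++ [c :: cs]) from rfl]
            rw [buildC]
            simp only [List.head?_cons]
            rw [show (c' :: tl') :: (rest' ++ [c :: cs]) = ((c' :: tl') :: rest') ++ [c :: cs] from rfl,
              filter_head_append_ne _ _ _ _ hc, filter_headne_append _ _ _ _ hc]

-- the root A builds is the built node for the whole word list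
theorem foldl_addWord (g : List (List Char)) : ∀ (h : List (List Char)),
    g.foldl (fun r w => addWord r w) (Trie.mk none 0 1 (buildN h 0)) = Trie.mk none 0 1 (buildN (h ++ g) 0) := by
  induction g with
  | nil => simp
  | cons w g ih =>
    intro h
    rw [List.foldl_cons, addWord_buildN (w.length + h.length) w h le_rfl, ih (h ++ [w])]
    simp

-- B's solve agrees with A's dfs at a node carrying the group's size as its count,
-- given the loop/children correspondence for this group (supplied by the induction)
theorem solveB_dfsT_of (g : List (List Char)) (d k : Int) (ch : Option Char)
    (H : ∀ (a b : Int), solveLoop (g.filter (fun w => !w.isEmpty)) d k a b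
      = (a + (dfsC (buildC (g.filter (fun w => !w.isEmpty)) d) k).1,
         b + (dfsC (buildC (g.filter (fun w => !w.isEmpty)) d) k).2)) :
    solveB g d k = dfsT (Trie.mk ch d (g.length : Int) (buildN g d)) k := by
  rw [solveB, dfsT, H 0 0]
  dsimp only [buildN]
  rcases h : dfsC (buildC (g.filter (fun w => !w.isEmpty)) d) k with ⟨s, v⟩
  simp only [zero_add]
  split_ifs with hk
  · exact Prod.ext (by simp; try ring) (by simp; try ring)
  · rfl

-- B's loop computes exactly A's dfs over the corresponding built children
theorem solveLoop_dfsC : ∀ (n : Nat) (l : List (List Char)), muW l ≤ n → (∀ x ∈ l, x ≠ []) →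
    ∀ (d k a b : Int), solveLoop l d k a b = (a + (dfsC (buildC l d) k).1, b + (dfsC (buildC l d) k).2) := by
  intro n
  induction n with
  | zero =>
    intro l hmu hne d k a b
    have hl : l = [] := by
      cases l with
      | nil => rfl
      | cons w rest => simp [muW] at hmu
    subst hl
    simp [solveLoop, buildC, dfsC]
  | succ n ih =>
    intro l hmu hne d k a b
    match l with
    | [] => simp [solveLoop, buildC, dfsC]
    | w :: rest =>
      obtain ⟨c, wtl, rfl⟩ : ∃ c t, w = c :: t := by
        cases w with
        | nil => exact absurd rfl (hne [] (by simp))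
        | cons c t => exact ⟨c, t, rfl⟩
      have hw : (c :: wtl).head? = some c := rfl
      have hsub : muW ((((c :: wtl) :: rest).filter (fun x => x.head? == some c)).map (fun x => x.tail)) < muW ((c :: wtl) :: rest) := muW_sub_lt _ rest c hw
      have hrest : muW (((c :: wtl) :: rest).filter (fun x => x.head? != some c)) < muW ((c :: wtl) :: rest) := muW_rest_lt _ rest c hw
      -- correspondence for this node's first child
      have hchild := solveB_dfsT_of
        ((((c :: wtl) :: rest).filter (fun x => x.head? == some c)).map (fun x => x.tail))
        (d + 1) k (some c)
        (fun a b => ih _ (by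
          have := muW_filter_le ((((c :: wtl) :: rest).filter (fun x => x.head? == some c)).map (fun x => x.tail)) (fun w => !w.isEmpty)
          omega) (filter_nonempty_ne_nil _) (d + 1) k a b)
      -- tail of the loop: induction hypothesis on the remaining groups
      have htail := ih (((c :: wtl) :: rest).filter (fun x => x.head? != some c))
        (by omega)
        (by intro x hx
            rcases List.mem_filter.1 hx with ⟨h1, -⟩
            exact hne x h1)
        d k
      rw [solveLoop, buildC]
      simp only [List.head?_cons]
      rw [hchild, htail]
      rw [dfsC]
      rcases h1 : dfsT (Trie.mk (some c) (d + 1)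
          (((((c :: wtl) :: rest).filter (fun x => x.head? == some c)).map (fun x => x.tail)).length : Int)
          (buildN ((((c :: wtl) :: rest).filter (fun x => x.head? == some c)).map (fun x => x.tail)) (d + 1))) k with ⟨c1, v1⟩
      rcases h2 : dfsC (buildC (((c :: wtl) :: rest).filter (fun x => x.head? != some c)) d) k with ⟨c2, v2⟩
      simp only [buildN, List.length_map] at h1
      rw [h1]
      exact Prod.ext (by simp; ring) (by simp; ring)

theorem solveB_dfsT (g : List (List Char)) (d k : Int) (ch : Option Char) :
    solveB g d k = dfsT (Trie.mk ch d (g.length : Int) (buildN g d)) k :=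
  solveB_dfsT_of g d k ch (fun a b => solveLoop_dfsC (muW (g.filter (fun w => !w.isEmpty))) _ le_rfl (filter_nonempty_ne_nil g) d k a b)

-- the value component of dfs at a depth-0 node ignores the node's own count
theorem dfsT_snd_zero (ch : Option Char) (cnt k : Int) (K : TChildren) :
    (dfsT (Trie.mk ch 0 cnt K) k).2 = (dfsC K k).2 := by
  rw [dfsT]
  split
  next s v heq => rw [heq]; dsimp only; split <;> simp

theorem get_max_sum_of_scores_spec : Claim_equal_get_max_sum_of_scores := by
  intro words k _ _
  unfold Spec_get_max_sum_of_scores get_max_sum_of_scores get_max_sum_of_scores_alt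
  have hfold : words.foldl (fun r w => addWord r w.toList) (Trie.mk none 0 1 .nil)
      = Trie.mk none 0 1 (buildN (words.map (fun w => w.toList)) 0) := by
    have h0 : (Trie.mk none 0 1 TChildren.nil) = Trie.mk none 0 1 (buildN [] 0) := by
      simp [buildN, buildC]
    have h1 : List.foldl (fun (r : Trie) w => addWord r w) (Trie.mk none 0 1 (buildN [] 0)) (words.map (fun w => w.toList)) = List.foldl (fun r w => addWord r w.toList) (Trie.mk none 0 1 (buildN [] 0)) words := List.foldl_map
    rw [h0, ← h1, foldl_addWord (words.map (fun w => w.toList)) []]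
    simp
  rw [hfold, solveB_dfsT (words.map (fun w => w.toList)) 0 k none]
  rw [dfsT_snd_zero, dfsT_snd_zero]
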